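-- pv_equiv track=rewrite | github.com/ROCKS-IT/MyFirstPythonPrograms | Exo_NSI_2/algo_math/math de foula.py | maxi
-- ===== SOURCE A (Python) =====
-- def maxi(liste):
--     v_max = liste[0]
--     pos_max = 0
--     for i in range(len(liste)):
--         if v_max < liste[i]:
--             v_max = liste[i]
--             pos_max = i
--     return v_max,pos_max
-- ===== SOURCE B (Python) =====
-- def maxi(liste):
--     v_max = max(liste)
--     return v_max, liste.index(v_max)
-- ===== Notes on version B (the rewrite author's own statement) =====
-- stated objective: idiomatic
-- what changed: Replaced the hand-written index-tracking loop by the built-in max() followed by list.index() to locate its first position (two library scans instead of one manual loop).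
import Mathlib
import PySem

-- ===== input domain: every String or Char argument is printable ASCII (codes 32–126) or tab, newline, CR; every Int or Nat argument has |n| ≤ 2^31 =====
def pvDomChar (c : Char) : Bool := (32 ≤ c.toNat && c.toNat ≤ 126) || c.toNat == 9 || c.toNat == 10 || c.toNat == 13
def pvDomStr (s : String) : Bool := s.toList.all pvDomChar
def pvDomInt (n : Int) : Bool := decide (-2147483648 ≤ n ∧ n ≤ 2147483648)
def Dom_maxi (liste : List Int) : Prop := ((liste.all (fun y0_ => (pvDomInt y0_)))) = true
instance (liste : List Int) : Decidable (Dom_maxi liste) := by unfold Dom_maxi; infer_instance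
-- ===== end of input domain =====

-- B replaces A's manual running-max loop by the idiomatic max() + list.index() (first position of the maximum).


-- ===== PORT A =====
def maxi (liste : List Int) : Int × Int :=
  match liste with
  | [] => (0, 0)  -- liste[0] raises IndexError; excluded by Pre_maxi
  | h :: _ =>
    (PySem.List.pyRange 0 (liste.length : Int) 1).foldl
      (fun st i =>
        if st.1 < PySem.List.pyGetD liste i 0 then (PySem.List.pyGetD liste i 0, i) else st)
      (h, 0)

-- ===== PORT B =====
def maxi_alt (liste : List Int) : Int × Int :=
  match PySem.List.max? liste (fun x => x) with
  | none => (0, 0)  -- max([]) raises ValueError; excluded by Pre_maxi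
  | some v =>
    match PySem.List.index? liste v with
    | some k => (v, (k : Int))
    | none => (0, 0)  -- unreachable: the maximum is in the list

-- ===== PRECONDITION & SPEC =====
-- A raises IndexError (and B's max raises ValueError) on the empty list.
def Pre_maxi (liste : List Int) : Prop := liste ≠ []
instance (liste : List Int) : Decidable (Pre_maxi liste) := by unfold Pre_maxi; infer_instance
def pvWitness_maxi : List Int := [3, 1, 3, 2]

def Spec_maxi (liste : List Int) (out : Int × Int) : Prop := out = maxi_alt liste
instance (liste : List Int) (out : Int × Int) : Decidable (Spec_maxi liste out) := by unfold Spec_maxi; infer_instance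

-- ===== CLAIM (what is proved, stated in full; the proofs are below) =====
def Claim_equal_maxi : Prop := ∀ (liste : List Int), Dom_maxi liste → Pre_maxi liste → Spec_maxi liste (maxi liste)

-- ===== LEMMAS AND PROOFS =====

-- structural mirror of A's loop (proof helper only)
def fmAux : List Int → Int → Int → Int → Int × Int
  | [], _, v, p => (v, p)
  | x :: t, i, v, p => if v < x then fmAux t (i + 1) x i else fmAux t (i + 1) v p

lemma foldA (liste : List Int) : ∀ (suf pre : List Int) (v p : Int), liste = pre ++ suf →
    (PySem.List.pyRange (pre.length : Int) (liste.length : Int) 1).foldl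
      (fun st i =>
        if st.1 < PySem.List.pyGetD liste i 0 then (PySem.List.pyGetD liste i 0, i) else st)
      (v, p)
    = fmAux suf (pre.length : Int) v p := by
  intro suf
  induction suf with
  | nil =>
    intro pre v p h
    subst h
    simp [PySem.List.pyRange_one_eq_nil, fmAux]
  | cons x t ih =>
    intro pre v p h
    have hlt : (pre.length : Int) < (liste.length : Int) := by
      subst h; simp
    rw [PySem.List.pyRange_one_cons hlt]
    have hget : PySem.List.pyGetD liste (pre.length : Int) 0 = x := by
      subst h
      rw [PySem.List.pyGetD_natCast]
      simp [List.getD]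
    have hpre : liste = (pre ++ [x]) ++ t := by simp [h]
    have hlen : (((pre ++ [x]).length : Nat) : Int) = (pre.length : Int) + 1 := by
      simp
    by_cases hvx : v < x
    · have hIH := ih (pre ++ [x]) x (pre.length : Int) hpre
      rw [hlen] at hIH
      simp only [List.foldl_cons, hget, fmAux, hvx, if_pos]
      exact hIH
    · have hIH := ih (pre ++ [x]) v p hpre
      rw [hlen] at hIH
      simp only [List.foldl_cons, hget, fmAux, hvx, if_false]
      exact hIH

lemma fmAux_spec : ∀ (suf : List Int) (i v p : Int),
    fmAux suf i v p =
      if v < suf.foldl max v then (suf.foldl max v, i + (suf.idxOf (suf.foldl max v) : Int))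
      else (v, p) := by
  intro suf
  induction suf with
  | nil => intro i v p; simp [fmAux]
  | cons x t ih =>
    intro i v p
    have hle : ∀ (a : Int), a ≤ t.foldl max a := fun a => (PySem.List.le_foldl_max t a).1
    by_cases hvx : v < x
    · have hmax : (x :: t).foldl max v = t.foldl max x := by
        simp [List.foldl_cons, max_eq_right hvx.le]
      simp only [fmAux, hvx, if_pos, hmax]
      rw [ih (i + 1) x i]
      by_cases hxM : x < t.foldl max x
      · have hne : x ≠ t.foldl max x := ne_of_lt hxM
        simp only [hxM, if_pos, if_pos (lt_of_lt_of_le hvx (hle x))]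
        rw [List.idxOf_cons_ne _ hne]
        push_cast
        ring_nf
      · have hM : t.foldl max x = x := le_antisymm (not_lt.mp hxM) (hle x)
        simp only [hM, if_pos hvx]
        simp [List.idxOf_cons_self]
    · have hmax : (x :: t).foldl max v = t.foldl max v := by
        simp [List.foldl_cons, max_eq_left (not_lt.mp hvx)]
      simp only [fmAux, hvx, if_false, hmax]
      rw [ih (i + 1) v p]
      by_cases hvM : v < t.foldl max v
      · have hne : x ≠ t.foldl max v := ne_of_lt (lt_of_le_of_lt (not_lt.mp hvx) hvM)
        simp only [hvM, if_pos]
        rw [List.idxOf_cons_ne _ hne]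
        push_cast
        ring_nf
      · simp [hvM]

lemma pvIdxOf?_of_mem (x : Int) (xs : List Int) (hx : x ∈ xs) :
    List.idxOf? x xs = some (xs.idxOf x) := by
  induction xs with
  | nil => cases hx
  | cons a t ih =>
    rcases List.mem_cons.mp hx with h | h
    · subst h
      simp [List.idxOf?, List.idxOf, List.findIdx?_cons, List.findIdx_cons]
    · by_cases hax : a = x
      · subst hax
        simp [List.idxOf?, List.idxOf, List.findIdx?_cons, List.findIdx_cons]
      · have hbe : (a == x) = false := by simp [hax]
        simp [List.idxOf?, List.idxOf, List.findIdx?_cons, List.findIdx_cons, hbe] at ih ⊢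
        exact ih h

-- ===== VERDICT (by name: the statement is the Claim_ definition above) =====
theorem maxi_spec : Claim_equal_maxi := by
  intro liste _ hpre
  unfold Spec_maxi
  match liste, hpre with
  | h :: t, _ =>
    have hA := foldA (h :: t) (h :: t) [] h 0 (by simp)
    simp only [List.length_nil, Nat.cast_zero] at hA
    simp only [maxi]
    rw [hA, fmAux_spec]
    have hM : (h :: t).foldl max h = t.foldl max h := by
      simp [List.foldl_cons]
    unfold maxi_alt
    rw [PySem.List.max?_id_cons]
    have hmem : t.foldl max h ∈ h :: t := by
      rcases PySem.List.foldl_max_mem t h with heq | hmem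
      · rw [heq]; exact List.mem_cons_self
      · exact List.mem_cons_of_mem _ hmem
    have hidx : List.idxOf? (t.foldl max h) (h :: t) = some (List.idxOf (t.foldl max h) (h :: t)) :=
      pvIdxOf?_of_mem _ _ hmem
    by_cases hlt : h < (h :: t).foldl max h
    · rw [hM] at hlt
      simp [hlt, hM, PySem.List.index?_eq_idxOf?, hidx]
    · rw [hM] at hlt
      have hEq : t.foldl max h = h := by
        have := (PySem.List.le_foldl_max t h).1
        omega
      have h0 : List.idxOf? h (h :: t) = some 0 := by
        simp [List.idxOf?, List.findIdx?_cons]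
      simp [hM, hEq, PySem.List.index?_eq_idxOf?, h0]
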